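-- pv_equiv track=rewrite | github.com/sousou-lab/dev-bot | app/github_client.py | _filter_repositories
-- ===== SOURCE A (Python) =====
-- def _filter_repositories(repos: list[str], query: str, limit: int) -> list[str]:
--     needle = query.strip().lower()
--     if needle:
--         ranked: list[tuple[tuple[int, int, int, str], str]] = []
--         for index, repo in enumerate(repos):
--             score = _repository_match_score(repo, needle)
--             if score is None:
--                 continue
--             ranked.append((score + (index, repo), repo))
--         ranked.sort(key=lambda item: item[0])
--         return [repo for _, repo in ranked[:limit]]
--     return repos[:limit]
--
-- def _repository_match_score(repo: str, needle: str) -> tuple[int, int] | None: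
--     lowered = repo.lower()
--     owner, _, repo_name = lowered.partition("/")
--     if lowered == needle:
--         return (0, 0)
--     if repo_name == needle:
--         return (1, 0)
--     if repo_name.startswith(needle):
--         return (2, repo_name.find(needle))
--     if lowered.startswith(needle):
--         return (3, lowered.find(needle))
--     if needle in repo_name:
--         return (4, repo_name.find(needle))
--     if needle in owner:
--         return (5, owner.find(needle))
--     if needle in lowered:
--         return (6, lowered.find(needle))
--     return None
-- ===== SOURCE B (Python) =====
-- def _filter_repositories(repos: list[str], query: str, limit: int) -> list[str]:
--     needle = query.strip().lower()
--     if not needle: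
--         return repos[:limit]
--     matches = []
--     for index, repo in enumerate(repos):
--         score = _repository_match_score(repo, needle)
--         if score is not None:
--             matches.append((score[0], score[1], index, repo))
--     out = []
--     for category in range(7):
--         for t in sorted((t for t in matches if t[0] == category), key=lambda t: t[1]):
--             out.append(t[3])
--     return out[:limit]
--
-- def _repository_match_score(repo: str, needle: str):
--     lowered = repo.lower()
--     owner, _, name = lowered.partition("/")
--     pos_all = lowered.find(needle)
--     if pos_all == -1:
--         return None
--     if lowered == needle:
--         return (0, 0)
--     if name == needle:
--         return (1, 0)
--     pos_name = name.find(needle)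
--     pos_owner = owner.find(needle)
--     if pos_name == 0:
--         return (2, 0)
--     if pos_all == 0:
--         return (3, 0)
--     if pos_name != -1:
--         return (4, pos_name)
--     if pos_owner != -1:
--         return (5, pos_owner)
--     return (6, pos_all)
-- ===== Notes on version B (the rewrite author's own statement) =====
-- stated objective: alternative
-- what changed: Replaces A's single composite-key (category, position, index, repo) sort with a group-by-category decomposition - one stable sort by position per category bucket, concatenated in category order 0..6 - and replaces the helper's substring-test cascade with a find-position-based scorer with an early exit when the needle does not occur at all.
import Mathlib
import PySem

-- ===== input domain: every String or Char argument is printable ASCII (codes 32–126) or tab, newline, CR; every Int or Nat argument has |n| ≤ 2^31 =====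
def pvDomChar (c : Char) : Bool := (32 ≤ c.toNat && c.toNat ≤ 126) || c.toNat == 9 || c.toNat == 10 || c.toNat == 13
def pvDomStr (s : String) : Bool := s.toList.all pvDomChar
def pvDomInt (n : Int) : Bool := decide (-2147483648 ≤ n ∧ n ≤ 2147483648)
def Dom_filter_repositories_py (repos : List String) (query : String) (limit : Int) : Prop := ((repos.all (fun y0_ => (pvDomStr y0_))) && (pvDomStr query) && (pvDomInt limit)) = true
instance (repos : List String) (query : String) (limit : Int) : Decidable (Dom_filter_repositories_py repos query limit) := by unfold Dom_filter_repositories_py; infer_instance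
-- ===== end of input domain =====

-- B replaces A's single composite-key sort by a group-by-category pass with a per-bucket
-- stable sort by position, and scores via find positions instead of a substring-test cascade
-- (alternative decomposition, same exact results).

-- ===== PORT A =====

-- hand port of s.partition("/") restricted to the (owner, repo_name) components A uses
-- (exact: split at the FIRST '/', or (s, "") when there is none)
def pvPartitionSlash (s : String) : String × String :=
  let i := PySem.Str.find s "/"
  if i = -1 then (s, "")
  else (PySem.Str.slice s none (some i), PySem.Str.slice s (some (i + 1)) none)

def repository_match_score_py (repo : String) (needle : String) : Option (Int × Int) :=
  let lowered := PySem.Str.lower repo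
  let owner := (pvPartitionSlash lowered).1
  let repo_name := (pvPartitionSlash lowered).2
  if lowered = needle then some (0, 0)
  else if repo_name = needle then some (1, 0)
  else if PySem.Str.startswith repo_name needle then some (2, PySem.Str.find repo_name needle)
  else if PySem.Str.startswith lowered needle then some (3, PySem.Str.find lowered needle)
  else if PySem.Str.isIn needle repo_name then some (4, PySem.Str.find repo_name needle)
  else if PySem.Str.isIn needle owner then some (5, PySem.Str.find owner needle)
  else if PySem.Str.isIn needle lowered then some (6, PySem.Str.find lowered needle)
  else none

-- Python's lexicographic '<' on the 4-tuple sort key (Int, Int, Int, String)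
def pvTuple4Lt (a b : Int × Int × Int × String) : Bool :=
  decide (a.1 < b.1) ||
    (a.1 == b.1 && (decide (a.2.1 < b.2.1) ||
      (a.2.1 == b.2.1 && (decide (a.2.2.1 < b.2.2.1) ||
        (a.2.2.1 == b.2.2.1 && decide (a.2.2.2 < b.2.2.2))))))

def filter_repositories_py (repos : List String) (query : String) (limit : Int) : List String :=
  let needle := PySem.Str.lower (PySem.Str.strip query)
  if needle ≠ "" then
    let ranked := (PySem.List.enumerate repos 0).foldl
      (fun acc p => match repository_match_score_py p.2 needle with
        | none => acc
        | some score => acc ++ [((score.1, score.2, p.1, p.2), p.2)]) []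
    -- ranked.sort(key=lambda item: item[0]): stable sort = PySem's insertion scheme
    -- (sorted_eq_foldl_insertBy) with the hand-written tuple comparator (exact; no 4-tuple key primitive)
    let sortedRanked := ranked.foldl
      (fun acc x => PySem.List.insertBy (fun a b => pvTuple4Lt a.1 b.1) x acc) []
    (PySem.List.slice sortedRanked none (some limit)).map (fun item => item.2)
  else PySem.List.slice repos none (some limit)

-- ===== PORT B =====

def repository_match_score_alt (repo : String) (needle : String) : Option (Int × Int) :=
  let lowered := PySem.Str.lower repo
  let owner := (pvPartitionSlash lowered).1
  let name := (pvPartitionSlash lowered).2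
  let posAll := PySem.Str.find lowered needle
  if posAll = -1 then none
  else if lowered = needle then some (0, 0)
  else if name = needle then some (1, 0)
  else
    let posName := PySem.Str.find name needle
    let posOwner := PySem.Str.find owner needle
    if posName = 0 then some (2, 0)
    else if posAll = 0 then some (3, 0)
    else if posName ≠ -1 then some (4, posName)
    else if posOwner ≠ -1 then some (5, posOwner)
    else some (6, posAll)

def filter_repositories_py_alt (repos : List String) (query : String) (limit : Int) : List String :=
  let needle := PySem.Str.lower (PySem.Str.strip query)
  if needle = "" then PySem.List.slice repos none (some limit)
  else
    let matched := (PySem.List.enumerate repos 0).foldl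
      (fun acc p => match repository_match_score_alt p.2 needle with
        | none => acc
        | some s => acc ++ [(s.1, s.2, p.1, p.2)]) []
    let out := (PySem.List.pyRange 0 7 1).foldl
      (fun acc c =>
        acc ++ (PySem.List.sorted (matched.filter (fun t => t.1 == c)) (fun t => t.2.1)).map
          (fun t => t.2.2.2)) []
    PySem.List.slice out none (some limit)

-- ===== PRECONDITION & SPEC =====
def Spec_filter_repositories_py (repos : List String) (query : String) (limit : Int) (out : List String) : Prop := out = filter_repositories_py_alt repos query limit
instance (repos : List String) (query : String) (limit : Int) (out : List String) : Decidable (Spec_filter_repositories_py repos query limit out) := by unfold Spec_filter_repositories_py; infer_instance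

-- ===== CLAIM (what is proved, stated in full; the proofs are below) =====
def Claim_equal_filter_repositories_py : Prop := ∀ (repos : List String) (query : String) (limit : Int), Dom_filter_repositories_py repos query limit → Spec_filter_repositories_py repos query limit (filter_repositories_py repos query limit)

-- ===== LEMMAS AND PROOFS =====

-- ---- string-level facts ----

theorem pv_startswith_iff_find_zero (s p : List Char) :
    PySem.Chars.startswith s p = true ↔ PySem.Chars.find s p = 0 := by
  unfold PySem.Chars.startswith
  rw [List.isPrefixOf_iff_prefix]
  constructor
  · intro hpre
    have hnn : 0 ≤ PySem.Chars.find s p := (PySem.Chars.find_nonneg_iff s p).mpr hpre.isInfix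
    obtain ⟨_, h2⟩ := PySem.Chars.find_spec hnn
    by_contra hne
    exact h2 0 (by omega) (by simpa using hpre)
  · intro h
    have hnn : 0 ≤ PySem.Chars.find s p := by omega
    obtain ⟨h1, _⟩ := PySem.Chars.find_spec hnn
    rw [h] at h1
    simpa using h1

theorem pv_isIn_iff_find_ne (p s : List Char) :
    PySem.Chars.isIn p s = true ↔ PySem.Chars.find s p ≠ -1 := by
  unfold PySem.Chars.isIn
  simp [bne_iff_ne]

theorem pv_owner_infix (s : String) : (pvPartitionSlash s).1.toList <:+: s.toList := by
  have hslash : ("/" : String).toList = ['/'] := rfl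
  have hcs : ∀ (l : List Char) (a b : Option Int),
      PySem.Chars.slice l a b = PySem.List.slice l a b := fun _ _ _ => rfl
  unfold pvPartitionSlash
  simp only [PySem.Str.find_eq, hslash]
  by_cases h : PySem.Chars.find s.toList ['/'] = -1
  · simp [h]
  · have h0 : (0 : Int) ≤ PySem.Chars.find s.toList ['/'] :=
      (PySem.Chars.find_nonneg_iff _ _).mpr ((PySem.Chars.find_ne_neg_one_iff _ _).mp h)
    rw [if_neg h]
    dsimp only
    rw [PySem.Str.toList_slice, hcs, PySem.List.slice_to _ h0]
    exact (List.take_prefix _ _).isInfix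

theorem pv_name_infix (s : String) : (pvPartitionSlash s).2.toList <:+: s.toList := by
  have hslash : ("/" : String).toList = ['/'] := rfl
  have hcs : ∀ (l : List Char) (a b : Option Int),
      PySem.Chars.slice l a b = PySem.List.slice l a b := fun _ _ _ => rfl
  unfold pvPartitionSlash
  simp only [PySem.Str.find_eq, hslash]
  by_cases h : PySem.Chars.find s.toList ['/'] = -1
  · simp [h]
  · have h0 : (0 : Int) ≤ PySem.Chars.find s.toList ['/'] :=
      (PySem.Chars.find_nonneg_iff _ _).mpr ((PySem.Chars.find_ne_neg_one_iff _ _).mp h)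
    rw [if_neg h]
    dsimp only
    rw [PySem.Str.toList_slice, hcs, PySem.List.slice_from _ (by omega)]
    exact (List.drop_suffix _ _).isInfix

-- the two scorers agree everywhere
theorem score_eq (repo needle : String) :
    repository_match_score_alt repo needle = repository_match_score_py repo needle := by
  unfold repository_match_score_alt repository_match_score_py
  simp only [PySem.Str.find_eq, PySem.Str.startswith_eq, PySem.Str.isIn_eq]
  set L := PySem.Str.lower repo with hLdef
  have hnInf : (pvPartitionSlash L).2.toList <:+: L.toList := pv_name_infix L
  have hoInf : (pvPartitionSlash L).1.toList <:+: L.toList := pv_owner_infix L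
  by_cases hIn : PySem.Chars.find L.toList needle.toList = -1
  · have hninf : ¬ needle.toList <:+: L.toList := (PySem.Chars.find_eq_neg_one_iff _ _).mp hIn
    have h0 : ¬ (L = needle) := fun h => hninf (by rw [h]; try exact List.infix_refl _)
    have h1 : ¬ ((pvPartitionSlash L).2 = needle) := fun h => hninf (by rw [← h]; exact hnInf)
    have h2 : ¬ (PySem.Chars.startswith (pvPartitionSlash L).2.toList needle.toList = true) := by
      intro h
      unfold PySem.Chars.startswith at h
      rw [List.isPrefixOf_iff_prefix] at h
      exact hninf (h.isInfix.trans hnInf)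
    have h3 : ¬ (PySem.Chars.startswith L.toList needle.toList = true) := by
      intro h
      unfold PySem.Chars.startswith at h
      rw [List.isPrefixOf_iff_prefix] at h
      exact hninf h.isInfix
    have h4 : ¬ (PySem.Chars.isIn needle.toList (pvPartitionSlash L).2.toList = true) := by
      intro h
      exact hninf (((PySem.Chars.isIn_iff_infix _ _).mp h).trans hnInf)
    have h5 : ¬ (PySem.Chars.isIn needle.toList (pvPartitionSlash L).1.toList = true) := by
      intro h
      exact hninf (((PySem.Chars.isIn_iff_infix _ _).mp h).trans hoInf)
    have h6 : ¬ (PySem.Chars.isIn needle.toList L.toList = true) := by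
      intro h
      exact hninf ((PySem.Chars.isIn_iff_infix _ _).mp h)
    simp [hIn, h0, h1, h2, h3, h4, h5, h6]
  · by_cases h0 : L = needle
    · have hIn' : ¬ PySem.Chars.find needle.toList needle.toList = -1 := by
        simpa [h0] using hIn
      simp [hIn, h0, hIn']
    · by_cases h1 : (pvPartitionSlash L).2 = needle
      · simp [hIn, h0, h1]
      · by_cases h2 : PySem.Chars.find (pvPartitionSlash L).2.toList needle.toList = 0
        · have hA2 : PySem.Chars.startswith (pvPartitionSlash L).2.toList needle.toList = true :=
            (pv_startswith_iff_find_zero _ _).mpr h2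
          simp [hIn, h0, h1, h2, hA2]
        · have hA2 : ¬ PySem.Chars.startswith (pvPartitionSlash L).2.toList needle.toList = true :=
            fun h => h2 ((pv_startswith_iff_find_zero _ _).mp h)
          by_cases h3 : PySem.Chars.find L.toList needle.toList = 0
          · have hA3 : PySem.Chars.startswith L.toList needle.toList = true :=
              (pv_startswith_iff_find_zero _ _).mpr h3
            simp [hIn, h0, h1, h2, h3, hA2, hA3]
          · have hA3 : ¬ PySem.Chars.startswith L.toList needle.toList = true :=
              fun h => h3 ((pv_startswith_iff_find_zero _ _).mp h)
            by_cases h4 : PySem.Chars.find (pvPartitionSlash L).2.toList needle.toList = -1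
            · have hA4 : ¬ PySem.Chars.isIn needle.toList (pvPartitionSlash L).2.toList = true :=
                fun h => ((pv_isIn_iff_find_ne _ _).mp h) h4
              by_cases h5 : PySem.Chars.find (pvPartitionSlash L).1.toList needle.toList = -1
              · have hA5 : ¬ PySem.Chars.isIn needle.toList (pvPartitionSlash L).1.toList = true :=
                  fun h => ((pv_isIn_iff_find_ne _ _).mp h) h5
                have hA6 : PySem.Chars.isIn needle.toList L.toList = true :=
                  (pv_isIn_iff_find_ne _ _).mpr hIn
                simp [hIn, h0, h1, h2, h3, h4, h5, hA2, hA3, hA4, hA5, hA6]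
              · have hA5 : PySem.Chars.isIn needle.toList (pvPartitionSlash L).1.toList = true :=
                  (pv_isIn_iff_find_ne _ _).mpr h5
                simp [hIn, h0, h1, h2, h3, h4, h5, hA2, hA3, hA4, hA5]
            · have hA4 : PySem.Chars.isIn needle.toList (pvPartitionSlash L).2.toList = true :=
                (pv_isIn_iff_find_ne _ _).mpr h4
              simp [hIn, h0, h1, h2, h3, h4, hA2, hA3, hA4]

theorem score_cat_range (repo needle : String) (s : Int × Int)
    (h : repository_match_score_alt repo needle = some s) : 0 ≤ s.1 ∧ s.1 < 7 := by
  simp only [repository_match_score_alt] at h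
  split_ifs at h <;>
    first
      | (rcases Option.some.inj h with rfl
         exact ⟨by norm_num, by norm_num⟩)
      | (exact absurd h (by simp))

-- ---- generic fold/insert lemmas ----

theorem pv_perm_insertBy {α : Type} (b : α → α → Bool) (x : α) (ys : List α) :
    (PySem.List.insertBy b x ys).Perm (x :: ys) := by
  induction ys with
  | nil => simp [PySem.List.insertBy]
  | cons y t ih =>
    by_cases hb : b x y = true
    · simp [PySem.List.insertBy, hb]
    · simp only [PySem.List.insertBy, hb, if_false, Bool.false_eq_true]
      exact (ih.cons y).trans (List.Perm.swap x y t)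

theorem pv_perm_foldl_insertBy {α : Type} (b : α → α → Bool) (l acc : List α) :
    (l.foldl (fun acc x => PySem.List.insertBy b x acc) acc).Perm (acc ++ l) := by
  induction l generalizing acc with
  | nil => simp
  | cons x t ih =>
    simp only [List.foldl_cons]
    refine (ih _).trans ?_
    refine ((pv_perm_insertBy b x acc).append_right t).trans ?_
    exact List.perm_middle.symm

theorem pv_pairwise_insertBy {α : Type} (R : α → α → Prop)
    (htrans : ∀ a b c, R a b → R b c → R a c) (b : α → α → Bool) (x : α) (ys : List α)
    (hys : ys.Pairwise R)
    (h1 : ∀ y ∈ ys, b x y = true → R x y) (h2 : ∀ y ∈ ys, b x y = false → R y x) :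
    (PySem.List.insertBy b x ys).Pairwise R := by
  induction ys with
  | nil => simp [PySem.List.insertBy]
  | cons y t ih =>
    rw [List.pairwise_cons] at hys
    obtain ⟨hy, ht⟩ := hys
    by_cases hb : b x y = true
    · simp only [PySem.List.insertBy, hb, if_true]
      refine List.pairwise_cons.mpr ⟨?_, List.pairwise_cons.mpr ⟨hy, ht⟩⟩
      intro z hz
      rcases List.mem_cons.mp hz with rfl | hzt
      · exact h1 z (by simp) hb
      · exact htrans x y z (h1 y (by simp) hb) (hy z hzt)
    · have hb' : b x y = false := by simpa using hb
      simp only [PySem.List.insertBy, hb', if_false, Bool.false_eq_true]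
      refine List.pairwise_cons.mpr ⟨?_, ih ht (fun z hz h => h1 z (by simp [hz]) h)
        (fun z hz h => h2 z (by simp [hz]) h)⟩
      intro z hz
      rcases (PySem.List.mem_insertBy _ _ _ _).mp hz with rfl | hzt
      · exact h2 y (by simp) hb'
      · exact hy z hzt

theorem pv_pairwise_foldl_insertBy {α : Type} (R : α → α → Prop)
    (htrans : ∀ a b c, R a b → R b c → R a c) (b : α → α → Bool) (l acc : List α)
    (hacc : acc.Pairwise R)
    (hCl : l.Pairwise (fun y x => (b x y = true → R x y) ∧ (b x y = false → R y x)))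
    (hCross : ∀ y ∈ acc, ∀ x ∈ l, (b x y = true → R x y) ∧ (b x y = false → R y x)) :
    (l.foldl (fun acc x => PySem.List.insertBy b x acc) acc).Pairwise R := by
  induction l generalizing acc with
  | nil => simpa using hacc
  | cons x t ih =>
    simp only [List.foldl_cons]
    have hx : ∀ y ∈ acc, (b x y = true → R x y) ∧ (b x y = false → R y x) :=
      fun y hy => hCross y hy x (by simp)
    have hacc' := pv_pairwise_insertBy R htrans b x acc hacc
      (fun y hy => (hx y hy).1) (fun y hy => (hx y hy).2)
    rw [List.pairwise_cons] at hCl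
    obtain ⟨hxC, htC⟩ := hCl
    refine ih _ hacc' htC ?_
    intro y hy z hz
    rcases (PySem.List.mem_insertBy _ _ _ _).mp hy with rfl | hyacc
    · exact hxC z hz
    · exact hCross y hyacc z (by simp [hz])

theorem pv_flatMap_perm_of {γ α : Type} (l : List γ) (g h : γ → List α)
    (hp : ∀ c ∈ l, (g c).Perm (h c)) : (l.flatMap g).Perm (l.flatMap h) := by
  induction l with
  | nil => simp
  | cons c t ih =>
    simp only [List.flatMap_cons]
    exact (hp c (by simp)).append (ih (fun d hd => hp d (by simp [hd])))

theorem pv_pairwise_flatMap {γ α : Type} (l : List γ) (g : γ → List α) (R : α → α → Prop)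
    (hl : l.Pairwise (fun c d => ∀ x ∈ g c, ∀ y ∈ g d, R x y))
    (hg : ∀ c ∈ l, (g c).Pairwise R) : (l.flatMap g).Pairwise R := by
  induction l with
  | nil => simp
  | cons c t ih =>
    simp only [List.flatMap_cons]
    rw [List.pairwise_cons] at hl
    obtain ⟨hc, ht⟩ := hl
    rw [List.pairwise_append]
    refine ⟨hg c (by simp), ih ht (fun d hd => hg d (by simp [hd])), ?_⟩
    intro a ha bb hb
    obtain ⟨d, hd, hbd⟩ := List.mem_flatMap.mp hb
    exact hc d hd a ha bb hbd

theorem pv_perm_partition (cs : List Int) (l : List (Int × Int × Int × String))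
    (hnd : cs.Nodup) (h : ∀ t ∈ l, t.1 ∈ cs) :
    (cs.flatMap (fun c => l.filter (fun t => t.1 == c))).Perm l := by
  induction cs generalizing l with
  | nil =>
    have hl : l = [] := List.eq_nil_iff_forall_not_mem.mpr (fun t ht => by simpa using h t ht)
    simp [hl]
  | cons c cs ih =>
    simp only [List.flatMap_cons]
    have hcns := List.nodup_cons.mp hnd
    have hstep : ∀ d ∈ cs, l.filter (fun t => t.1 == d)
        = (l.filter (fun t => !(t.1 == c))).filter (fun t => t.1 == d) := by
      intro d hd
      have hdc : d ≠ c := fun hdc => hcns.1 (hdc ▸ hd)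
      rw [List.filter_filter]
      refine (List.filter_congr ?_).symm
      intro t ht
      by_cases h1 : t.1 = d
      · simp [h1, hdc]
      · simp [h1]
    have hperm2 : (cs.flatMap (fun d => l.filter (fun t => t.1 == d))).Perm
        (l.filter (fun t => !(t.1 == c))) := by
      refine (pv_flatMap_perm_of cs _ _ (fun d hd => by rw [hstep d hd])).trans ?_
      refine ih _ hcns.2 ?_
      intro t ht
      have hm := List.mem_filter.mp ht
      rcases List.mem_cons.mp (h t hm.1) with h3 | h3
      · exfalso
        simp [h3] at hm
      · exact h3
    refine (List.Perm.append_left _ hperm2).trans ?_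
    exact List.filter_append_perm _ l

theorem pv_map_slice {α β : Type} (f : α → β) (l : List α) (b : Int) :
    (PySem.List.slice l none (some b)).map f = PySem.List.slice (l.map f) none (some b) := by
  by_cases hb : 0 ≤ b
  · rw [PySem.List.slice_to _ hb, PySem.List.slice_to _ hb, List.map_take]
  · have hk : 0 < (-b).toNat := by omega
    have hbe : b = -(((-b).toNat : Nat) : Int) := by omega
    rw [hbe, PySem.List.slice_to_neg_natCast _ _ hk, PySem.List.slice_to_neg_natCast _ _ hk,
      List.map_take, List.length_map]

-- ---- the strict order on match entries ----

def pvR3 (a b : Int × Int × Int × String) : Prop :=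
  a.1 < b.1 ∨ (a.1 = b.1 ∧ (a.2.1 < b.2.1 ∨ (a.2.1 = b.2.1 ∧ a.2.2.1 < b.2.2.1)))

def pvR4 (a b : (Int × Int × Int × String) × String) : Prop := pvR3 a.1 b.1

theorem pvR3_trans (a b c : Int × Int × Int × String) (h1 : pvR3 a b) (h2 : pvR3 b c) :
    pvR3 a c := by
  unfold pvR3 at h1 h2 ⊢
  omega

theorem pv_lt4_of {a b : Int × Int × Int × String} (hidx : a.2.2.1 < b.2.2.1) :
    (pvTuple4Lt b a = true → pvR3 b a) ∧ (pvTuple4Lt b a = false → pvR3 a b) := by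
  constructor
  · intro h
    simp only [pvTuple4Lt, Bool.or_eq_true, Bool.and_eq_true, decide_eq_true_eq,
      beq_iff_eq] at h
    unfold pvR3
    rcases h with h | ⟨h1, h⟩
    · exact Or.inl h
    rcases h with h | ⟨h2, h⟩
    · exact Or.inr ⟨h1, Or.inl h⟩
    rcases h with h | ⟨h3, _⟩
    · exact Or.inr ⟨h1, Or.inr ⟨h2, h⟩⟩
    · omega
  · intro h
    have hb : ¬ (b.1 < a.1 ∨ (b.1 = a.1 ∧ (b.2.1 < a.2.1 ∨ (b.2.1 = a.2.1 ∧
        (b.2.2.1 < a.2.2.1 ∨ (b.2.2.1 = a.2.2.1 ∧ b.2.2.2 < a.2.2.2)))))) := by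
      intro hcontra
      have hT : pvTuple4Lt b a = true := by
        simp only [pvTuple4Lt, Bool.or_eq_true, Bool.and_eq_true, decide_eq_true_eq,
          beq_iff_eq]
        exact hcontra
      rw [h] at hT
      exact Bool.false_ne_true hT
    push_neg at hb
    unfold pvR3
    rcases lt_trichotomy a.1 b.1 with hx | hx | hx
    · exact Or.inl hx
    · have hb2 := hb.2 hx.symm
      rcases lt_trichotomy a.2.1 b.2.1 with hy | hy | hy
      · exact Or.inr ⟨hx, Or.inl hy⟩
      · exact Or.inr ⟨hx, Or.inr ⟨hy, hidx⟩⟩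
      · exact absurd hb2.1 (by omega)
    · exact absurd hb.1 (by omega)

-- ---- specialised rewritings of the two ports' loops ----

theorem pv_ranked_go (needle : String) (l : List (Int × String))
    (acc : List ((Int × Int × Int × String) × String)) :
    l.foldl (fun acc p => match repository_match_score_py p.2 needle with
        | none => acc
        | some score => acc ++ [((score.1, score.2, p.1, p.2), p.2)]) acc
      = acc ++ l.filterMap (fun p => (repository_match_score_py p.2 needle).map
          (fun s => ((s.1, s.2, p.1, p.2), p.2))) := by
  induction l generalizing acc with
  | nil => simp
  | cons x t ih => cases hfx : repository_match_score_py x.2 needle <;> simp [hfx, ih]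

theorem pv_ranked_eq (repos : List String) (needle : String) :
    (PySem.List.enumerate repos 0).foldl
      (fun acc (p : Int × String) => match repository_match_score_py p.2 needle with
        | none => acc
        | some score => acc ++ [((score.1, score.2, p.1, p.2), p.2)]) []
    = (PySem.List.enumerate repos 0).filterMap
        (fun (p : Int × String) => (repository_match_score_py p.2 needle).map
          (fun s => ((s.1, s.2, p.1, p.2), p.2))) :=
  (pv_ranked_go needle _ []).trans (by simp)

theorem pv_matched_go (needle : String) (l : List (Int × String))
    (acc : List (Int × Int × Int × String)) :
    l.foldl (fun acc p => match repository_match_score_alt p.2 needle with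
        | none => acc
        | some s => acc ++ [(s.1, s.2, p.1, p.2)]) acc
      = acc ++ l.filterMap (fun p => (repository_match_score_alt p.2 needle).map
          (fun s => (s.1, s.2, p.1, p.2))) := by
  induction l generalizing acc with
  | nil => simp
  | cons x t ih => cases hfx : repository_match_score_alt x.2 needle <;> simp [hfx, ih]

theorem pv_matched_eq (repos : List String) (needle : String) :
    (PySem.List.enumerate repos 0).foldl
      (fun acc (p : Int × String) => match repository_match_score_alt p.2 needle with
        | none => acc
        | some s => acc ++ [(s.1, s.2, p.1, p.2)]) []
    = (PySem.List.enumerate repos 0).filterMap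
        (fun (p : Int × String) => (repository_match_score_alt p.2 needle).map
          (fun s => (s.1, s.2, p.1, p.2))) :=
  (pv_matched_go needle _ []).trans (by simp)

theorem pv_out_eq (m : List (Int × Int × Int × String)) :
    (PySem.List.pyRange 0 7 1).foldl
      (fun acc c =>
        acc ++ (PySem.List.sorted (m.filter (fun t => t.1 == c)) (fun t => t.2.1)).map
          (fun t => t.2.2.2)) []
    = (([0, 1, 2, 3, 4, 5, 6] : List Int).flatMap
        (fun c => PySem.List.sorted (m.filter (fun t => t.1 == c)) (fun t => t.2.1))).map
          (fun t => t.2.2.2) := by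
  have hr : PySem.List.pyRange 0 7 1 = [0, 1, 2, 3, 4, 5, 6] := by decide
  rw [hr, List.map_flatMap]
  exact PySem.List.foldl_append_eq_flatMap _ _ []

-- ψ turns a B-side match entry into an A-side ranked entry
theorem pv_M4_eq (repos : List String) (needle : String) :
    (PySem.List.enumerate repos 0).filterMap
      (fun (p : Int × String) => (repository_match_score_py p.2 needle).map
        (fun s => ((s.1, s.2, p.1, p.2), p.2)))
    = ((PySem.List.enumerate repos 0).filterMap
        (fun (p : Int × String) => (repository_match_score_alt p.2 needle).map
          (fun s => (s.1, s.2, p.1, p.2)))).map (fun t => (t, t.2.2.2)) := by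
  rw [List.map_filterMap]
  congr 1
  funext p
  rw [score_eq]
  cases repository_match_score_py p.2 needle <;> rfl

-- ---- main equality ----

theorem pv_main (repos : List String) (query : String) (limit : Int) :
    filter_repositories_py repos query limit = filter_repositories_py_alt repos query limit := by
  by_cases hq : PySem.Str.lower (PySem.Str.strip query) = ""
  · simp [filter_repositories_py, filter_repositories_py_alt, hq]
  · simp only [filter_repositories_py, filter_repositories_py_alt, hq, if_neg hq, ne_eq,
      not_false_iff, if_true, if_pos]
    rw [pv_ranked_eq, pv_matched_eq, pv_out_eq, pv_M4_eq]
    set needle := PySem.Str.lower (PySem.Str.strip query) with hndl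
    set M3 := (PySem.List.enumerate repos 0).filterMap
      (fun (p : Int × String) => (repository_match_score_alt p.2 needle).map
        (fun s => (s.1, s.2, p.1, p.2))) with hM3
    set ψ : (Int × Int × Int × String) → ((Int × Int × Int × String) × String) :=
      (fun t => (t, t.2.2.2)) with hψ
    set b4 : ((Int × Int × Int × String) × String) → ((Int × Int × Int × String) × String) → Bool :=
      (fun a b => pvTuple4Lt a.1 b.1) with hb4
    set SA := (M3.map ψ).foldl (fun acc x => PySem.List.insertBy b4 x acc) [] with hSA
    set TB := ([0, 1, 2, 3, 4, 5, 6] : List Int).flatMap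
      (fun c => PySem.List.sorted (M3.filter (fun t => t.1 == c)) (fun t => t.2.1)) with hTB
    -- structural facts about M3
    have hidx3 : M3.Pairwise (fun a b => a.2.2.1 < b.2.2.1) := by
      rw [hM3, List.pairwise_filterMap]
      refine (PySem.List.pairwise_lt_enumerate repos 0).imp ?_
      intro p q hpq bb hb bb' hb'
      obtain ⟨s, _, rfl⟩ := Option.map_eq_some_iff.mp hb
      obtain ⟨s', _, rfl⟩ := Option.map_eq_some_iff.mp hb'
      exact hpq
    have hcats : ∀ t ∈ M3, t.1 ∈ ([0, 1, 2, 3, 4, 5, 6] : List Int) := by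
      intro t ht
      rw [hM3] at ht
      obtain ⟨p, _, hp⟩ := List.mem_filterMap.mp ht
      obtain ⟨s, hs, rfl⟩ := Option.map_eq_some_iff.mp hp
      have := score_cat_range p.2 needle s hs
      simp only [List.mem_cons, List.mem_singleton]
      omega
    -- A side: sorted, pairwise
    have hR4trans : ∀ a b c, pvR4 a b → pvR4 b c → pvR4 a c :=
      fun a b c h1 h2 => pvR3_trans a.1 b.1 c.1 h1 h2
    have hidx4 : (M3.map ψ).Pairwise (fun a b => a.1.2.2.1 < b.1.2.2.1) := by
      rw [List.pairwise_map]
      exact hidx3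
    have hpwA : SA.Pairwise pvR4 := by
      rw [hSA]
      refine pv_pairwise_foldl_insertBy pvR4 hR4trans b4 _ [] (by simp) ?_ (by simp)
      refine hidx4.imp ?_
      intro a b hab
      exact pv_lt4_of hab
    have hpermA : SA.Perm (M3.map ψ) := pv_perm_foldl_insertBy b4 (M3.map ψ) []
    -- B side: permutation and pairwise of TB
    have hTBperm : TB.Perm M3 := by
      rw [hTB]
      refine (pv_flatMap_perm_of _ _ _ (fun c _ => PySem.List.sorted_perm _ _ _)).trans ?_
      exact pv_perm_partition _ M3 (by decide) hcats
    have hTBpw : TB.Pairwise pvR3 := by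
      rw [hTB]
      refine pv_pairwise_flatMap _ _ _ ?_ ?_
      · have hlt : ([0, 1, 2, 3, 4, 5, 6] : List Int).Pairwise (· < ·) := by decide
        refine hlt.imp ?_
        intro c d hcd x hx y hy
        rw [PySem.List.mem_sorted] at hx hy
        have hxc := (List.mem_filter.mp hx).2
        have hyd := (List.mem_filter.mp hy).2
        rw [beq_iff_eq] at hxc hyd
        exact Or.inl (by omega)
      · intro c _
        rw [PySem.List.sorted_eq_foldl_insertBy]
        refine pv_pairwise_foldl_insertBy pvR3 pvR3_trans _ _ [] (by simp) ?_ (by simp)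
        have hfpw := hidx3.filter (fun t => t.1 == c)
        refine List.Pairwise.imp_of_mem ?_ hfpw
        intro y x hy hx hyx
        have hyc := (List.mem_filter.mp hy).2
        have hxc := (List.mem_filter.mp hx).2
        rw [beq_iff_eq] at hyc hxc
        constructor
        · intro hlt
          rw [decide_eq_true_eq] at hlt
          exact Or.inr ⟨by omega, Or.inl hlt⟩
        · intro hlt
          rw [decide_eq_false_iff_not] at hlt
          rcases lt_trichotomy y.2.1 x.2.1 with h | h | h
          · exact Or.inr ⟨by omega, Or.inl h⟩
          · exact Or.inr ⟨by omega, Or.inr ⟨h, hyx⟩⟩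
          · exact absurd h hlt
    have hpwB : (TB.map ψ).Pairwise pvR4 := by
      rw [List.pairwise_map]
      exact hTBpw.imp (fun h => h)
    have hperm : SA.Perm (TB.map ψ) := hpermA.trans (hTBperm.map ψ).symm
    have hSAeq : SA = TB.map ψ := by
      refine List.Perm.eq_of_pairwise ?_ hpwA hpwB hperm
      intro a b _ _ h1 h2
      exfalso
      unfold pvR4 pvR3 at h1 h2
      omega
    rw [pv_map_slice, hSAeq, List.map_map]
    rfl

-- ===== VERDICT (by name: the statement is the Claim_ definition above) =====
theorem filter_repositories_py_spec : Claim_equal_filter_repositories_py := by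
  intro repos query limit _
  unfold Spec_filter_repositories_py
  exact pv_main repos query limit
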